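-- pv_equiv track=rewrite | github.com/yhr0864/MA | cross_NAS/general_functions/.ipynb_checkpoints/prune_utils-checkpoint.py | pack_filter_para
-- ===== SOURCE A (Python) =====
-- def pack_filter_para(start_id, end_id, num_filters):
--     para = [[] for i in range(end_id-start_id+1)]
--     for i in num_filters:
--         if start_id <= i[0] <= end_id:
--             para[i[0]-start_id].append(i[1])
--     for i in para:
--         if len(i) == 0:
--             i.append(None)
--     return para
-- ===== SOURCE B (Python) =====
-- def pack_filter_para(start_id, end_id, num_filters):
--     return [[i[1] for i in num_filters if i[0] == idx] or [None]
--             for idx in range(start_id, end_id + 1)]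
-- ===== Notes on version B (the rewrite author's own statement) =====
-- stated objective: simpler
-- what changed: Replaces A's scatter-into-preallocated-buckets pass plus a separate None-fixup loop with a single comprehension that, for each id in range, collects its values by scanning num_filters and uses `or [None]` for empty buckets.
import Mathlib
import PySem

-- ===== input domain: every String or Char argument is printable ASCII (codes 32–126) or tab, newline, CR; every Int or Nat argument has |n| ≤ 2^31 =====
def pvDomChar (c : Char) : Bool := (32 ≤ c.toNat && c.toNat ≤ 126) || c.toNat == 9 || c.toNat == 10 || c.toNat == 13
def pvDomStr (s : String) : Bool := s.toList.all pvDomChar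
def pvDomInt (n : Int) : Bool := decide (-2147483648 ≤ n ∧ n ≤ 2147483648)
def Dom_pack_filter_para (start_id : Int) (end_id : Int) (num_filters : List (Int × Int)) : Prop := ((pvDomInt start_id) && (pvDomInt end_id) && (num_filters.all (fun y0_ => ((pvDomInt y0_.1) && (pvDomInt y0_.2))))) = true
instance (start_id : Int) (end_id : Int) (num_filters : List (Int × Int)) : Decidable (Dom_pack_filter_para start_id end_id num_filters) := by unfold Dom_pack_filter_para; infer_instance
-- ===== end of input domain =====

-- B replaces A's scatter-into-preallocated-buckets pass plus a None-fixup loop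
-- with one comprehension that collects each id's values by a per-id scan (simpler).


-- ===== PORT A =====
-- one scatter step: para[i[0]-start_id].append(i[1]) guarded by the range test
def pfpStep (start_id : Int) (end_id : Int)
    (para : List (List (Option Int))) (i : Int × Int) : List (List (Option Int)) :=
  if start_id ≤ i.1 ∧ i.1 ≤ end_id then
    para.set (i.1 - start_id).toNat (para.getD (i.1 - start_id).toNat [] ++ [some i.2])
  else para

def pack_filter_para (start_id : Int) (end_id : Int) (num_filters : List (Int × Int)) : List (List (Option Int)) :=
  -- para = [[] for i in range(end_id-start_id+1)]
  let para0 : List (List (Option Int)) := (List.range (end_id - start_id + 1).toNat).map (fun _ => [])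
  -- for i in num_filters: if start_id <= i[0] <= end_id: para[i[0]-start_id].append(i[1])
  let para := num_filters.foldl (pfpStep start_id end_id) para0
  -- for i in para: if len(i) == 0: i.append(None)
  para.map (fun b => if b.length = 0 then [none] else b)

-- ===== PORT B =====
def pack_filter_para_alt (start_id : Int) (end_id : Int) (num_filters : List (Int × Int)) : List (List (Option Int)) :=
  (PySem.List.pyRange start_id (end_id + 1) 1).map (fun idx =>
    let vals := (num_filters.filter (fun i => i.1 == idx)).map (fun i => some i.2)
    if vals = [] then [none] else vals)

-- ===== PRECONDITION & SPEC =====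
def Spec_pack_filter_para (start_id : Int) (end_id : Int) (num_filters : List (Int × Int)) (out : List (List (Option Int))) : Prop := out = pack_filter_para_alt start_id end_id num_filters
instance (start_id : Int) (end_id : Int) (num_filters : List (Int × Int)) (out : List (List (Option Int))) : Decidable (Spec_pack_filter_para start_id end_id num_filters out) := by unfold Spec_pack_filter_para; infer_instance

-- ===== CLAIM (what is proved, stated in full; the proofs are below) =====
def Claim_equal_pack_filter_para : Prop := ∀ (start_id : Int) (end_id : Int) (num_filters : List (Int × Int)), Dom_pack_filter_para start_id end_id num_filters → Spec_pack_filter_para start_id end_id num_filters (pack_filter_para start_id end_id num_filters)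

-- ===== LEMMAS AND PROOFS =====

lemma pfp_foldl_length (s e : Int) (nf : List (Int × Int)) (para : List (List (Option Int))) :
    (nf.foldl (pfpStep s e) para).length = para.length := by
  induction nf generalizing para with
  | nil => rfl
  | cons i nf ih =>
    simp only [List.foldl_cons]
    rw [ih]
    unfold pfpStep
    split <;> simp

-- invariant: each bucket j holds its initial content followed by the values whose id is s + j
lemma pfp_foldl_getD (s e : Int) (nf : List (Int × Int)) (para : List (List (Option Int)))
    (hlen : (para.length : Int) = e - s + 1) (j : Nat) (hj : (j : Int) < e - s + 1) :
    (nf.foldl (pfpStep s e) para).getD j [] =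
      para.getD j [] ++ (nf.filter (fun i => i.1 == s + (j : Int))).map (fun i => some i.2) := by
  induction nf generalizing para with
  | nil => simp
  | cons i nf ih =>
    simp only [List.foldl_cons, List.filter_cons]
    by_cases hc : s ≤ i.1 ∧ i.1 ≤ e
    · have hk : (i.1 - s).toNat < para.length := by omega
      by_cases hij : i.1 = s + (j : Int)
      · have hkj : (i.1 - s).toNat = j := by omega
        have hstep : pfpStep s e para i =
            para.set j (para.getD j [] ++ [some i.2]) := by
          simp [pfpStep, hc, hkj]
        rw [hstep, ih _ (by simpa using hlen) ]
        have hjlt : j < para.length := by omega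
        rw [List.getD_eq_getElem _ _ (by simpa using hjlt), List.getElem_set_self]
        simp [hij]
      · have hkj : (i.1 - s).toNat ≠ j := by omega
        have hstep : pfpStep s e para i =
            para.set (i.1 - s).toNat (para.getD (i.1 - s).toNat [] ++ [some i.2]) := by
          simp [pfpStep, hc]
        rw [hstep, ih _ (by simpa using hlen)]
        have hfilt : (i.1 == s + (j : Int)) = false := by simp [hij]
        rw [hfilt]
        congr 1
        by_cases hjlt : j < para.length
        · rw [List.getD_eq_getElem _ _ (by simpa using hjlt),
            List.getD_eq_getElem _ _ hjlt, List.getElem_set_ne (by omega)]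
        · omega
    · have hstep : pfpStep s e para i = para := by simp [pfpStep, hc]
      have hfilt : (i.1 == s + (j : Int)) = false := by
        simp only [beq_eq_false_iff_ne, ne_eq]
        intro h; exact hc (by omega)
      rw [hstep, ih _ hlen]
      simp [hfilt]

-- ===== VERDICT (by name: the statement is the Claim_ definition above) =====
theorem pack_filter_para_spec : Claim_equal_pack_filter_para := by
  intro s e nf _
  unfold Spec_pack_filter_para pack_filter_para pack_filter_para_alt
  rw [PySem.List.pyRange_one]
  have hn : (e + 1 - s).toNat = (e - s + 1).toNat := by omega
  rw [hn]
  set n := (e - s + 1).toNat with hndef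
  apply List.ext_getElem
  · simp [pfp_foldl_length]
  · intro j h1 h2
    have hjn : j < n := by simpa [pfp_foldl_length] using h1
    simp only [List.getElem_map, List.getElem_range]
    have hj : (j : Int) < e - s + 1 := by omega
    have hkey := pfp_foldl_getD s e nf ((List.range n).map (fun _ => ([] : List (Option Int))))
      (by simp; omega) j hj
    have hflip : (nf.filter (fun i => i.1 == s + (j : Int))) = nf.filter (fun i => s + (j : Int) == i.1) := by
      apply List.filter_congr; intro x _; simp [eq_comm]
    have hget : (nf.foldl (pfpStep s e) ((List.range n).map (fun _ => ([] : List (Option Int)))))[j]'(by simpa [pfp_foldl_length] using hjn) =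
        (nf.filter (fun i => i.1 == s + (j : Int))).map (fun i => some i.2) := by
      rw [← List.getD_eq_getElem _ ([] : List (Option Int)) _, hkey]
      simp
    rw [hget, hflip]
    simp only [List.length_eq_zero_iff]
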